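-- pv_equiv track=rewrite | github.com/chenomg/LintCode | 002_Trailing Zeros/Trailing_Zeros.py | get_2_5
-- ===== SOURCE A (Python) =====
-- def get_2_5(num):
--     count_2 = 0
--     count_5 = 0
--     for i in str(num)[::-1]:
--         if int(i):
--             if not int(i) % 2:
--                 count_2 = int(i) // 2
--                 return [count_2, count_5]
--             elif not int(i) % 5:
--                 count_5 = int(i) // 5
--                 return [count_2, count_5]
--             else:
--                 return [count_2, count_5]
-- ===== SOURCE B (Python) =====
-- def get_2_5(num):
--     n = abs(num)
--     if n == 0:
--         return None
--     while n % 10 == 0: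
--         n //= 10
--     d = n % 10
--     if d % 2 == 0:
--         return [d // 2, 0]
--     if d % 5 == 0:
--         return [0, d // 5]
--     return [0, 0]
-- ===== Notes on version B (the rewrite author's own statement) =====
-- stated objective: alternative
-- what changed: Replaces A's character scan over the reversed decimal string (with repeated int(i) parsing) by pure arithmetic on abs(num): strip trailing zeros with integer division and branch once on the last nonzero digit; no string is built.
import Mathlib
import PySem

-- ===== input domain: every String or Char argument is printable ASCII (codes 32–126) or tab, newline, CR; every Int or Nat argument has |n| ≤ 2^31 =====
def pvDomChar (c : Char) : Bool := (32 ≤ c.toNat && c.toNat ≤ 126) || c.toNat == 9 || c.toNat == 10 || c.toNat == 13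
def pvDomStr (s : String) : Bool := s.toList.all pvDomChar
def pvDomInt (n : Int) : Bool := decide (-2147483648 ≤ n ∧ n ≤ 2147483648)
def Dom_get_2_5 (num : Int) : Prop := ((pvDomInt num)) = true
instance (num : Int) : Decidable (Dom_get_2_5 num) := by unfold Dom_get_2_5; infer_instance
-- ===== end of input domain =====

-- B replaces A's character-by-character scan of str(num)[::-1] by pure arithmetic on abs(num)
-- (strip trailing zeros with //10, then branch on the last digit): objective 'alternative'.

-- ===== PORT A =====
-- the 'for i in str(num)[::-1]' loop with its early returns; count_2/count_5 stay 0 until a return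
def get_2_5_loop (cs : List Char) (count_2 count_5 : Int) : Option (List Int) :=
  match cs with
  | [] => none                       -- loop falls through: Python returns None
  | c :: rest =>
    match PySem.Int.ofChars? [c] with
    | none => none                   -- int(i) ValueError — unreachable: str of an int reaches '-' only after a nonzero digit or never
    | some v =>
      if v ≠ 0 then                  -- 'if int(i):'
        if PySem.Int.mod v 2 = 0 then some [PySem.Int.floordiv v 2, count_5]
        else if PySem.Int.mod v 5 = 0 then some [count_2, PySem.Int.floordiv v 5]
        else some [count_2, count_5]
      else get_2_5_loop rest count_2 count_5

def get_2_5 (num : Int) : Option (List Int) :=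
  get_2_5_loop ((PySem.Int.toChars num).reverse) 0 0

-- ===== PORT B =====
-- 'while n % 10 == 0: n //= 10' with n = abs(num) > 0; Python's // and % on nonnegative ints are Nat division/mod (exact)
def stripTrailingZeros (n : Nat) : Nat :=
  if h : n ≠ 0 ∧ n % 10 = 0 then stripTrailingZeros (n / 10) else n
  termination_by n
  decreasing_by exact Nat.div_lt_self (Nat.pos_of_ne_zero h.1) (by norm_num)

def get_2_5_alt (num : Int) : Option (List Int) :=
  let n := num.natAbs
  if n = 0 then none
  else
    let d := stripTrailingZeros n % 10
    if d % 2 = 0 then some [(d / 2 : Nat), 0]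
    else if d % 5 = 0 then some [0, (d / 5 : Nat)]
    else some [0, 0]

-- ===== PRECONDITION & SPEC =====
def Spec_get_2_5 (num : Int) (out : Option (List Int)) : Prop := out = get_2_5_alt num
instance (num : Int) (out : Option (List Int)) : Decidable (Spec_get_2_5 num out) := by unfold Spec_get_2_5; infer_instance

-- ===== CLAIM (what is proved, stated in full; the proofs are below) =====
def Claim_equal_get_2_5 : Prop := ∀ (num : Int), Dom_get_2_5 num → Spec_get_2_5 num (get_2_5 num)

-- ===== LEMMAS AND PROOFS =====

-- str(n)'s digit characters for n : Nat, in REVERSED (low-to-high) order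
def revDigits (n : Nat) : List Char :=
  if h : n / 10 = 0 then [Nat.digitChar (n % 10)]
  else Nat.digitChar (n % 10) :: revDigits (n / 10)
  termination_by n
  decreasing_by exact Nat.div_lt_self (Nat.pos_of_ne_zero (fun h0 => h (by simp [h0]))) (by norm_num)

lemma revDigits_eq (n : Nat) :
    revDigits n = Nat.digitChar (n % 10) :: (if n / 10 = 0 then [] else revDigits (n / 10)) := by
  rw [revDigits]; split <;> rfl

lemma toDigitsCore_eq (f : Nat) : ∀ (n : Nat) (l : List Char), n < f →
    Nat.toDigitsCore 10 f n l = (revDigits n).reverse ++ l := by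
  induction f with
  | zero => intro n l h; omega
  | succ f ih =>
    intro n l h
    rw [revDigits_eq]
    by_cases h10 : n / 10 = 0
    · simp [Nat.toDigitsCore, h10]
    · have hlt : n / 10 < f := by
        have : n / 10 < n := Nat.div_lt_self (by omega) (by norm_num)
        omega
      simp only [Nat.toDigitsCore, h10, if_false, ih (n / 10) _ hlt]
      simp

lemma toDigits_eq_revDigits (n : Nat) : Nat.toDigits 10 n = (revDigits n).reverse :=
  (toDigitsCore_eq (n + 1) n [] (by omega)).trans (by simp)

-- one nonzero digit d at the head of the reversed string: A returns, and the value matches B's branch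
lemma step_digit (d : Nat) (hd : d < 10) (hne : d ≠ 0) (rest : List Char) :
    get_2_5_loop (Nat.digitChar d :: rest) 0 0 =
      (if d % 2 = 0 then some [((d / 2 : Nat) : Int), 0]
       else if d % 5 = 0 then some [0, ((d / 5 : Nat) : Int)]
       else some [0, 0]) := by
  interval_cases d <;> simp_all <;> rfl

lemma strip_step (n : Nat) (hn : 0 < n) (hd : n % 10 = 0) :
    stripTrailingZeros n = stripTrailingZeros (n / 10) := by
  conv_lhs => rw [stripTrailingZeros]
  rw [dif_pos ⟨by omega, hd⟩]

lemma strip_stop (n : Nat) (hd : n % 10 ≠ 0) : stripTrailingZeros n = n := by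
  conv_lhs => rw [stripTrailingZeros]
  rw [dif_neg (by omega)]

lemma alt_pos (n : Nat) (hn : 0 < n) :
    get_2_5_alt (n : Int) =
      (if stripTrailingZeros n % 10 % 2 = 0 then some [((stripTrailingZeros n % 10 / 2 : Nat) : Int), 0]
       else if stripTrailingZeros n % 10 % 5 = 0 then some [0, ((stripTrailingZeros n % 10 / 5 : Nat) : Int)]
       else some [0, 0]) := by
  simp only [get_2_5_alt, Int.natAbs_natCast]
  rw [if_neg (by omega)]

lemma loop_eq (n : Nat) (hn : 0 < n) : ∀ (tail : List Char),
    get_2_5_loop (revDigits n ++ tail) 0 0 = get_2_5_alt (n : Int) := by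
  induction n using Nat.strong_induction_on with
  | _ n ih =>
    intro tail
    rw [revDigits_eq]
    by_cases hd : n % 10 = 0
    · -- head digit is '0': A skips it, B strips it
      have h10 : n / 10 ≠ 0 := by omega
      have hlt : n / 10 < n := Nat.div_lt_self hn (by norm_num)
      simp only [hd, if_neg h10]
      have hskip : get_2_5_loop (Nat.digitChar 0 :: (revDigits (n / 10) ++ tail)) 0 0 =
          get_2_5_loop (revDigits (n / 10) ++ tail) 0 0 := rfl
      rw [List.cons_append, hskip, ih (n / 10) hlt (by omega) tail]
      rw [alt_pos (n / 10) (by omega), alt_pos n hn, strip_step n hn hd]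
    · -- head digit nonzero: both sides branch on it
      rw [List.cons_append, step_digit (n % 10) (by omega) hd]
      rw [alt_pos n hn, strip_stop n hd]

lemma alt_natAbs (num : Int) : get_2_5_alt ((num.natAbs : Nat) : Int) = get_2_5_alt num := by
  simp only [get_2_5_alt, Int.natAbs_natCast]

-- ===== VERDICT (by name: the statement is the Claim_ definition above) =====
theorem get_2_5_spec : Claim_equal_get_2_5 := by
  intro num _
  unfold Spec_get_2_5 get_2_5
  rcases lt_trichotomy num 0 with hneg | hz | hpos
  · -- negative: reversed chars = revDigits |num| ++ ['-']
    have : PySem.Int.toChars num = '-' :: Nat.toDigits 10 num.natAbs := by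
      simp [PySem.Int.toChars, hneg]
    rw [this, toDigits_eq_revDigits]
    simp only [List.reverse_cons, List.reverse_reverse]
    rw [loop_eq num.natAbs (by omega) ['-'], alt_natAbs]
  · subst hz; rfl
  · have h1 : PySem.Int.toChars num = Nat.toDigits 10 num.toNat := by
      simp [PySem.Int.toChars, not_lt.mpr (le_of_lt hpos)]
    rw [h1, toDigits_eq_revDigits, List.reverse_reverse]
    have := loop_eq num.toNat (by omega) []
    rw [List.append_nil] at this
    rw [this]
    congr 1
    omega
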